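-- pv_equiv track=rewrite | github.com/ankurelexbit/predictorV2 | modeling_pipeline/pipeline_v4/scripts/validate_live_features.py | _check_feature_groups
-- ===== SOURCE A (Python) =====
-- def _check_feature_groups(features: dict) -> dict:
--     """Count features by group."""
--     groups = {
--         'Pillar 1 - Elo': 0,
--         'Pillar 1 - Standings': 0,
--         'Pillar 1 - Form': 0,
--         'Pillar 1 - H2H': 0,
--         'Pillar 1 - Home Advantage': 0,
--         'Pillar 2 - xG': 0,
--         'Pillar 2 - Shots': 0,
--         'Pillar 2 - Defense': 0,
--         'Pillar 2 - Attacks': 0,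
--         'Pillar 3 - Momentum': 0,
--         'Pillar 3 - Parity': 0,
--         'Pillar 3 - Draw Features': 0,
--     }
--
--     for key in features.keys():
--         if 'elo' in key:
--             groups['Pillar 1 - Elo'] += 1
--         elif any(x in key for x in ['position', 'points', 'top_6', 'bottom_3', 'goal_difference']):
--             groups['Pillar 1 - Standings'] += 1
--         elif any(x in key for x in ['form', 'wins_', 'draws_', 'points_3', 'points_5', 'points_10']):
--             groups['Pillar 1 - Form'] += 1
--         elif 'h2h' in key:
--             groups['Pillar 1 - H2H'] += 1
--         elif 'home_advantage' in key or 'venue' in key: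
--             groups['Pillar 1 - Home Advantage'] += 1
--         elif 'xg' in key.lower():
--             groups['Pillar 2 - xG'] += 1
--         elif 'shot' in key:
--             groups['Pillar 2 - Shots'] += 1
--         elif any(x in key for x in ['tackles', 'interceptions', 'clearances', 'blocks']):
--             groups['Pillar 2 - Defense'] += 1
--         elif 'attack' in key or 'dribble' in key or 'cross' in key:
--             groups['Pillar 2 - Attacks'] += 1
--         elif 'momentum' in key or 'trend' in key:
--             groups['Pillar 3 - Momentum'] += 1
--         elif 'parity' in key or 'difference' in key:
--             groups['Pillar 3 - Parity'] += 1
--         elif 'draw' in key: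
--             groups['Pillar 3 - Draw Features'] += 1
--
--     return groups
-- ===== SOURCE B (Python) =====
-- _RULES = [
--     ('Pillar 1 - Elo', ['elo'], False),
--     ('Pillar 1 - Standings', ['position', 'points', 'top_6', 'bottom_3', 'goal_difference'], False),
--     ('Pillar 1 - Form', ['form', 'wins_', 'draws_', 'points_3', 'points_5', 'points_10'], False),
--     ('Pillar 1 - H2H', ['h2h'], False),
--     ('Pillar 1 - Home Advantage', ['home_advantage', 'venue'], False),
--     ('Pillar 2 - xG', ['xg'], True),
--     ('Pillar 2 - Shots', ['shot'], False),
--     ('Pillar 2 - Defense', ['tackles', 'interceptions', 'clearances', 'blocks'], False),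
--     ('Pillar 2 - Attacks', ['attack', 'dribble', 'cross'], False),
--     ('Pillar 3 - Momentum', ['momentum', 'trend'], False),
--     ('Pillar 3 - Parity', ['parity', 'difference'], False),
--     ('Pillar 3 - Draw Features', ['draw'], False),
-- ]
--
--
-- def _check_feature_groups(features: dict) -> dict:
--     """Count features by group via staged partition passes: each rule in priority
--     order claims (counts and removes) its matching keys from the remaining pool,
--     so earlier rules shadow later ones exactly like the original elif chain."""
--     remaining = list(features.keys())
--     groups = {}
--     for name, subs, ci in _RULES:
--         matched, remaining = _partition(remaining, subs, ci)
--         groups[name] = len(matched)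
--     return groups
--
--
-- def _partition(keys, subs, ci):
--     """Split keys into (matching, non-matching) for this rule's substrings."""
--     matched, rest = [], []
--     for k in keys:
--         hay = k.lower() if ci else k
--         (matched if any(s in hay for s in subs) else rest).append(k)
--     return matched, rest
-- ===== Notes on version B (the rewrite author's own statement) =====
-- stated objective: alternative
-- what changed: Replaces A's per-key twelve-branch elif cascade (key-major, one dict increment per key) with rule-major staged partition passes: each rule in priority order splits the remaining key pool into matched/unmatched, records the matched count, and passes only the unmatched keys to later rules, so earlier rules shadow later ones by removal instead of elif short-circuiting.
import Mathlib
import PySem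

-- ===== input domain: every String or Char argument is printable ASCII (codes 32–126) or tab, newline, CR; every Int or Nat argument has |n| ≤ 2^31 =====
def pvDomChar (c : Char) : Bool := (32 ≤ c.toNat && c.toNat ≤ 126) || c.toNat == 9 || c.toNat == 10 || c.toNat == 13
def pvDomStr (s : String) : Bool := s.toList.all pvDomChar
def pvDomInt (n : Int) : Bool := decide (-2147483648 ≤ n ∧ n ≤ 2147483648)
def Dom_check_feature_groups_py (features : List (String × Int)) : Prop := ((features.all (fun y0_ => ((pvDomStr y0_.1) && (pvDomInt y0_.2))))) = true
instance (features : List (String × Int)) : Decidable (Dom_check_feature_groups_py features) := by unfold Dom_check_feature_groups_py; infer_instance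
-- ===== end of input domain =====

-- B replaces A's per-key twelve-branch elif cascade by staged partition passes: each rule, in
-- priority order, counts and removes its matching keys from the remaining pool; same cost, alternative.

-- ===== PORT A =====
def pvGroupsInit : PySem.Dict String Int :=
  PySem.Dict.mk [("Pillar 1 - Elo", 0), ("Pillar 1 - Standings", 0), ("Pillar 1 - Form", 0),
   ("Pillar 1 - H2H", 0), ("Pillar 1 - Home Advantage", 0), ("Pillar 2 - xG", 0),
   ("Pillar 2 - Shots", 0), ("Pillar 2 - Defense", 0), ("Pillar 2 - Attacks", 0),
   ("Pillar 3 - Momentum", 0), ("Pillar 3 - Parity", 0), ("Pillar 3 - Draw Features", 0)]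

-- one body of A's elif cascade, applied to (groups, key)
def pvStepA (groups : PySem.Dict String Int) (key : String) : PySem.Dict String Int :=
  if PySem.Str.isIn "elo" key then
    groups.modify "Pillar 1 - Elo" 0 (· + 1)
  else if (["position", "points", "top_6", "bottom_3", "goal_difference"].any
      (fun x => PySem.Str.isIn x key)) then
    groups.modify "Pillar 1 - Standings" 0 (· + 1)
  else if (["form", "wins_", "draws_", "points_3", "points_5", "points_10"].any
      (fun x => PySem.Str.isIn x key)) then
    groups.modify "Pillar 1 - Form" 0 (· + 1)
  else if PySem.Str.isIn "h2h" key then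
    groups.modify "Pillar 1 - H2H" 0 (· + 1)
  else if PySem.Str.isIn "home_advantage" key || PySem.Str.isIn "venue" key then
    groups.modify "Pillar 1 - Home Advantage" 0 (· + 1)
  else if PySem.Str.isIn "xg" (PySem.Str.lower key) then
    groups.modify "Pillar 2 - xG" 0 (· + 1)
  else if PySem.Str.isIn "shot" key then
    groups.modify "Pillar 2 - Shots" 0 (· + 1)
  else if (["tackles", "interceptions", "clearances", "blocks"].any
      (fun x => PySem.Str.isIn x key)) then
    groups.modify "Pillar 2 - Defense" 0 (· + 1)
  else if PySem.Str.isIn "attack" key || PySem.Str.isIn "dribble" key || PySem.Str.isIn "cross" key then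
    groups.modify "Pillar 2 - Attacks" 0 (· + 1)
  else if PySem.Str.isIn "momentum" key || PySem.Str.isIn "trend" key then
    groups.modify "Pillar 3 - Momentum" 0 (· + 1)
  else if PySem.Str.isIn "parity" key || PySem.Str.isIn "difference" key then
    groups.modify "Pillar 3 - Parity" 0 (· + 1)
  else if PySem.Str.isIn "draw" key then
    groups.modify "Pillar 3 - Draw Features" 0 (· + 1)
  else groups

def check_feature_groups_py (features : List (String × Int)) : List (String × Int) :=
  -- 'for key in features.keys()': the dict's keys in insertion order, duplicates collapsed
  ((PySem.List.dedup (features.map Prod.fst)).foldl pvStepA pvGroupsInit).items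

-- ===== PORT B =====
-- the rules table of Source B: (group name, substrings, case-insensitive flag)
def pvRules : List (String × List String × Bool) :=
  [("Pillar 1 - Elo", ["elo"], false),
   ("Pillar 1 - Standings", ["position", "points", "top_6", "bottom_3", "goal_difference"], false),
   ("Pillar 1 - Form", ["form", "wins_", "draws_", "points_3", "points_5", "points_10"], false),
   ("Pillar 1 - H2H", ["h2h"], false),
   ("Pillar 1 - Home Advantage", ["home_advantage", "venue"], false),
   ("Pillar 2 - xG", ["xg"], true),
   ("Pillar 2 - Shots", ["shot"], false),
   ("Pillar 2 - Defense", ["tackles", "interceptions", "clearances", "blocks"], false),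
   ("Pillar 2 - Attacks", ["attack", "dribble", "cross"], false),
   ("Pillar 3 - Momentum", ["momentum", "trend"], false),
   ("Pillar 3 - Parity", ["parity", "difference"], false),
   ("Pillar 3 - Draw Features", ["draw"], false)]

-- does this rule's substring list hit the (optionally lowercased) key?
def pvHit (subs : List String) (ci : Bool) (k : String) : Bool :=
  let hay := if ci then PySem.Str.lower k else k
  subs.any (fun s => PySem.Str.isIn s hay)

-- _partition of Source B: one pass appending each key to 'matched' or 'rest'
def pvPartition (keys : List String) (subs : List String) (ci : Bool) :
    List String × List String :=
  keys.foldl (fun acc k =>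
    if pvHit subs ci k then (acc.1 ++ [k], acc.2) else (acc.1, acc.2 ++ [k])) ([], [])

-- the 'for name, subs, ci in _RULES' loop: groups is a dict of fresh keys inserted in
-- rule order, i.e. exactly this association list
def pvScanB : List (String × List String × Bool) → List String → List (String × Int)
  | [], _ => []
  | (name, subs, ci) :: rest, remaining =>
      let p := pvPartition remaining subs ci
      (name, (p.1.length : Int)) :: pvScanB rest p.2

def check_feature_groups_py_alt (features : List (String × Int)) : List (String × Int) :=
  pvScanB pvRules (PySem.List.dedup (features.map Prod.fst))

-- ===== PRECONDITION & SPEC =====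
def Spec_check_feature_groups_py (features : List (String × Int)) (out : List (String × Int)) : Prop := out = check_feature_groups_py_alt features
instance (features : List (String × Int)) (out : List (String × Int)) : Decidable (Spec_check_feature_groups_py features out) := by unfold Spec_check_feature_groups_py; infer_instance

-- ===== CLAIM =====
def Claim_equal_check_feature_groups_py : Prop := ∀ (features : List (String × Int)), Dom_check_feature_groups_py features → Spec_check_feature_groups_py features (check_feature_groups_py features)

-- ===== LEMMAS AND PROOFS =====

-- first rule (as listed in rs) hit by key k, if any
def pvFirstGroup : List (String × List String × Bool) → String → Option String
  | [], _ => none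
  | (name, subs, ci) :: rest, key =>
    if pvHit subs ci key then some name else pvFirstGroup rest key

-- per-key: A's elif cascade increments exactly the first pvRules rule hit by the key
set_option maxHeartbeats 1000000 in
theorem pvStep_eq (groups : PySem.Dict String Int) (key : String) :
    pvStepA groups key = (match pvFirstGroup pvRules key with
      | some name => groups.modify name 0 (· + 1)
      | none => groups) := by
  simp only [pvRules, pvFirstGroup, pvHit, List.any_cons, List.any_nil, Bool.or_false,
    Bool.false_eq_true, if_false, if_true]
  simp only [apply_ite (fun o : Option String =>
    (match o with
      | some name => groups.modify name 0 (· + 1)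
      | none => groups))]
  simp only [pvStepA, List.any_cons, List.any_nil, Bool.or_false, Bool.or_assoc]

theorem pvFirstGroup_mem {rs : List (String × List String × Bool)} {k : String} {n : String}
    (h : pvFirstGroup rs k = some n) : n ∈ rs.map Prod.fst := by
  induction rs with
  | nil => simp [pvFirstGroup] at h
  | cons r rest ih =>
    obtain ⟨name, subs, ci⟩ := r
    simp only [pvFirstGroup] at h
    by_cases hm : pvHit subs ci k
    · simp [hm] at h; simp [h]
    · simp [hm] at h; exact List.mem_cons_of_mem _ (ih h)

-- A's count for a group name after the whole fold
theorem pvFoldA_getD (K : List String) (d : PySem.Dict String Int)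
    (n : String) :
    (K.foldl pvStepA d).getD n 0 =
      d.getD n 0 + ((K.countP (fun k => pvFirstGroup pvRules k == some n) : Nat) : Int) := by
  induction K generalizing d with
  | nil => simp
  | cons k K ih =>
    simp only [List.foldl_cons, List.countP_cons, ih, pvStep_eq]
    cases hfg : pvFirstGroup pvRules k with
    | none => simp
    | some n0 =>
      rw [PySem.Dict.getD_modify]
      by_cases hn : n = n0
      · subst hn; simp; ring
      · simp [hn, Ne.symm hn]

-- the fold keeps the initial key list
theorem pvFoldA_keys (K : List String) (d : PySem.Dict String Int)
    (hd : d.keys = pvRules.map Prod.fst) :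
    (K.foldl pvStepA d).keys = pvRules.map Prod.fst := by
  induction K generalizing d with
  | nil => simpa using hd
  | cons k K ih =>
    simp only [List.foldl_cons]
    apply ih
    rw [pvStep_eq]
    cases hfg : pvFirstGroup pvRules k with
    | none => simpa using hd
    | some n0 =>
      have hmem : n0 ∈ d.keys := hd ▸ pvFirstGroup_mem hfg
      rw [PySem.Dict.keys_modify, PySem.Dict.keys_insert_of_contains]
      · exact hd
      · exact (PySem.Dict.contains_iff_mem_keys _ _).mpr hmem

-- A's whole result, characterised
theorem pvA_items (K : List String) :
    (K.foldl pvStepA pvGroupsInit).items =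
      pvRules.map (fun r => (r.1, ((K.countP (fun k => pvFirstGroup pvRules k == some r.1) : Nat) : Int))) := by
  have hkeys : (K.foldl pvStepA pvGroupsInit).keys = pvRules.map Prod.fst :=
    pvFoldA_keys K pvGroupsInit (by decide)
  have hnd : (K.foldl pvStepA pvGroupsInit).keys.Nodup := by rw [hkeys]; decide
  rw [PySem.Dict.items_eq_map_keys _ hnd 0, hkeys, List.map_map]
  apply List.map_congr_left
  intro r hr
  have h0 : pvGroupsInit.getD r.1 0 = 0 := by
    fin_cases hr <;> decide
  simp only [Function.comp_apply, pvFoldA_getD K pvGroupsInit r.1, h0,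
    zero_add]

-- B's partition is (filter hit, filter miss)
theorem pvPartition_go (keys : List String) (subs : List String) (ci : Bool)
    (a b : List String) :
    keys.foldl (fun acc k =>
      if pvHit subs ci k then (acc.1 ++ [k], acc.2) else (acc.1, acc.2 ++ [k])) (a, b) =
      (a ++ keys.filter (pvHit subs ci), b ++ keys.filter (fun k => ! pvHit subs ci k)) := by
  induction keys generalizing a b with
  | nil => simp
  | cons k keys ih =>
    simp only [List.foldl_cons, List.filter_cons]
    by_cases h : pvHit subs ci k <;> simp [h, ih]

theorem pvPartition_eq (keys : List String) (subs : List String) (ci : Bool) :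
    pvPartition keys subs ci =
      (keys.filter (pvHit subs ci), keys.filter (fun k => ! pvHit subs ci k)) := by
  simpa using pvPartition_go keys subs ci [] []

-- B's scan, characterised by first-match counts (rule names assumed distinct)
theorem pvScanB_eq (rs : List (String × List String × Bool)) (K : List String)
    (hnd : (rs.map Prod.fst).Nodup) :
    pvScanB rs K =
      rs.map (fun r => (r.1, ((K.countP (fun k => pvFirstGroup rs k == some r.1) : Nat) : Int))) := by
  induction rs generalizing K with
  | nil => simp [pvScanB]
  | cons r rest ih =>
    obtain ⟨name, subs, ci⟩ := r
    simp only [List.map_cons, List.nodup_cons] at hnd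
    obtain ⟨hni, hnd'⟩ := hnd
    simp only [pvScanB, pvPartition_eq, List.map_cons]
    congr 1
    · -- head: count of keys hit by this rule = count of keys whose first match is this rule
      congr 1
      rw [← List.countP_eq_length_filter]
      congr 1
      apply List.countP_congr
      intro k _
      simp only [pvFirstGroup]
      by_cases h : pvHit subs ci k
      · simp [h]
      · have hno : pvFirstGroup rest k ≠ some name :=
          fun hh => hni (by simpa using pvFirstGroup_mem hh)
        simp [h, hno]
    · -- tail: filtering out this rule's keys = restricting first-match to the remaining rules
      rw [ih _ hnd']
      apply List.map_congr_left
      intro r' hr'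
      have hne : r'.1 ≠ name := by
        intro he; exact hni (he ▸ List.mem_map_of_mem hr')
      congr 2
      rw [List.countP_filter]
      apply List.countP_congr
      intro k _
      simp only [pvFirstGroup]
      by_cases h : pvHit subs ci k <;> simp [h, Ne.symm hne]

-- ===== VERDICT =====
theorem check_feature_groups_py_spec : Claim_equal_check_feature_groups_py := by
  intro features _
  show check_feature_groups_py features = check_feature_groups_py_alt features
  unfold check_feature_groups_py check_feature_groups_py_alt
  rw [pvA_items, pvScanB_eq _ _ (by decide)]
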